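-- pv_equiv track=rewrite | github.com/vanpersie9987/vanpersie9987 | luogu1.py | redCards
-- ===== SOURCE A (Python) =====
-- from functools import cache
-- from typing import List, Optional
--
-- def redCards(grid: List[List[int]]) -> int:
--     @cache
--     def dfs(i: int, j: int) -> int:
--         if j == n:
--             return 0
--         return min(dfs((i + 1) % m, j + 1), dfs(i, j + 1)) + grid[i][j]
--     m = len(grid)
--     n = len(grid[0])
--     return min(dfs(i, 0) for i in range(m))
-- ===== SOURCE B (Python) =====
-- from typing import List
--
-- def redCards(grid: List[List[int]]) -> int:
--     m = len(grid)
--     n = len(grid[0])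
--     dp = [0] * m
--     for j in range(n - 1, -1, -1):
--         dp = [min(dp[i], dp[(i + 1) % m]) + grid[i][j] for i in range(m)]
--     return min(dp)
-- ===== Notes on version B (the rewrite author's own statement) =====
-- stated objective: faster
-- what changed: Replaced the memoized top-down recursion (functools.cache over (i,j) states with generator-of-recursions at the end) by an iterative bottom-up tabulation with a rolling 1D array filled from the last column backward.
import Mathlib
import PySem

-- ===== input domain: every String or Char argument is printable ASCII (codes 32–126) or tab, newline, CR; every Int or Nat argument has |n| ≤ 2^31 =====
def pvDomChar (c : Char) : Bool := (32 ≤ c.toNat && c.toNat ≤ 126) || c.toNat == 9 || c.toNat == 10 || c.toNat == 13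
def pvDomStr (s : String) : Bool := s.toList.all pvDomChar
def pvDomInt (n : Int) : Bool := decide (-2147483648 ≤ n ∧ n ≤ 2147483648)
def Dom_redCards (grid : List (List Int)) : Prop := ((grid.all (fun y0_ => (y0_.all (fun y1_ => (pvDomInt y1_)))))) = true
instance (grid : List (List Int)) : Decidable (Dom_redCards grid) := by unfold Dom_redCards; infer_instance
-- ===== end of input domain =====

-- B replaces A's memoized top-down recursion by a bottom-up rolling-array tabulation
-- over columns (objective: constant-factor faster, O(m) memory, no recursion/cache).

-- ===== PORT A =====
-- dfs(i, j) of A; the extra first argument is fuel (= n - j + 1 at every call site),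
-- needed only so Lean sees termination: Python's recursion always reaches j == n.
def dfsA (grid : List (List Int)) (m n : Nat) : Nat → Nat → Nat → Int
  | 0, _, _ => 0
  | fuel + 1, i, j =>
    if j = n then 0
    else min (dfsA grid m n fuel ((i + 1) % m) (j + 1)) (dfsA grid m n fuel i (j + 1))
           + (grid.getD i []).getD j 0

def redCards (grid : List (List Int)) : Int :=
  let m := grid.length
  let n := (grid.getD 0 []).length          -- grid[0]: Pre_ excludes the empty grid (IndexError)
  (PySem.List.min? ((List.range m).map (fun i => dfsA grid m n (n + 1) i 0)) (fun x => x)).getD 0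

-- ===== PORT B =====
def stepB (grid : List (List Int)) (m : Nat) (dp : List Int) (j : Nat) : List Int :=
  (List.range m).map (fun i => min (dp.getD i 0) (dp.getD ((i + 1) % m) 0)
                                + (grid.getD i []).getD j 0)

def redCards_alt (grid : List (List Int)) : Int :=
  let m := grid.length
  let n := (grid.getD 0 []).length
  let dp := ((List.range n).reverse).foldl (stepB grid m) (List.replicate m (0 : Int))
  (PySem.List.min? dp (fun x => x)).getD 0

-- ===== PRECONDITION & SPEC =====
-- Pre_: exactly the inputs where Python A returns: the grid is nonempty (else
-- len(grid[0]) raises IndexError) and every row has at least len(grid[0]) columns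
-- (else grid[i][j] raises IndexError during the recursion).
def Pre_redCards (grid : List (List Int)) : Prop :=
  grid ≠ [] ∧ ∀ r ∈ grid, (grid.getD 0 []).length ≤ r.length
instance (grid : List (List Int)) : Decidable (Pre_redCards grid) := by
  unfold Pre_redCards; infer_instance
def pvWitness_redCards : List (List Int) := [[1, 2], [3, 4]]

def Spec_redCards (grid : List (List Int)) (out : Int) : Prop := out = redCards_alt grid
instance (grid : List (List Int)) (out : Int) : Decidable (Spec_redCards grid out) := by
  unfold Spec_redCards; infer_instance

-- ===== CLAIM (what is proved, stated in full; the proofs are below) =====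
def Claim_equal_redCards : Prop :=
  ∀ (grid : List (List Int)), Dom_redCards grid → Pre_redCards grid →
    Spec_redCards grid (redCards grid)

-- ===== LEMMAS AND PROOFS =====

-- dfsA does not depend on the fuel, as long as it exceeds n - j.
theorem dfsA_fuel (grid : List (List Int)) (m n : Nat) :
    ∀ fuel fuel' i j, j ≤ n → n - j < fuel → n - j < fuel' →
      dfsA grid m n fuel i j = dfsA grid m n fuel' i j := by
  intro fuel
  induction fuel with
  | zero => intro fuel' i j hjn h h'; omega
  | succ f ih =>
    intro fuel' i j hle h h'
    cases fuel' with
    | zero => omega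
    | succ f' =>
      simp only [dfsA]
      by_cases hj : j = n
      · simp [hj]
      · have hjn : j < n := by omega
        simp only [if_neg hj]
        rw [ih f' ((i + 1) % m) (j + 1) (by omega) (by omega) (by omega),
            ih f' i (j + 1) (by omega) (by omega) (by omega)]

-- the dp array after processing columns n-1, …, j is exactly (dfs · j) on the rows
theorem dp_invariant (grid : List (List Int)) (m n : Nat) (hm : 0 < m) :
    ∀ k j, j + k = n →
      ((List.range' j k).reverse).foldl (stepB grid m) (List.replicate m (0 : Int))
        = (List.range m).map (fun i => dfsA grid m n (n - j + 1) i j) := by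
  intro k
  induction k with
  | zero =>
    intro j hj
    subst hj
    simp [dfsA]
  | succ k ih =>
    intro j hj
    rw [List.range'_succ, List.reverse_cons', List.concat_eq_append, List.foldl_append]
    simp only [List.foldl_cons, List.foldl_nil]
    rw [ih (j + 1) (by omega)]
    unfold stepB
    apply List.map_congr_left
    intro i hi
    have hi' : i < m := List.mem_range.mp hi
    have hmod : (i + 1) % m < m := Nat.mod_lt _ hm
    have hget : ∀ i', i' < m →
        ((List.range m).map (fun i => dfsA grid m n (n - (j + 1) + 1) i (j + 1))).getD i' 0
          = dfsA grid m n (n - (j + 1) + 1) i' (j + 1) := by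
      intro i' hi'
      rw [List.getD_eq_getElem?_getD, List.getElem?_map, List.getElem?_range hi']
      rfl
    rw [hget i hi', hget _ hmod]
    have hjn : j < n := by omega
    have hdfs : dfsA grid m n (n - j + 1) i j
        = min (dfsA grid m n (n - j) ((i + 1) % m) (j + 1))
              (dfsA grid m n (n - j) i (j + 1)) + (grid.getD i []).getD j 0 := by
      have : n - j + 1 = (n - j) + 1 := rfl
      rw [this]
      simp only [dfsA]
      rw [if_neg (by omega)]
    rw [hdfs,
        dfsA_fuel grid m n (n - j) (n - (j + 1) + 1) ((i + 1) % m) (j + 1) (by omega) (by omega) (by omega),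
        dfsA_fuel grid m n (n - j) (n - (j + 1) + 1) i (j + 1) (by omega) (by omega) (by omega)]
    congr 1
    exact min_comm _ _

-- ===== VERDICT (by name: the statement is the Claim_ definition above) =====
theorem redCards_spec : Claim_equal_redCards := by
  intro grid _ hpre
  unfold Spec_redCards redCards redCards_alt
  have hm : 0 < grid.length := List.length_pos_iff.mpr hpre.1
  have h := dp_invariant grid grid.length (grid.getD 0 []).length hm
      (grid.getD 0 []).length 0 (by omega)
  rw [← List.range_eq_range'] at h
  simp only [Nat.sub_zero] at h
  show (PySem.List.min? ((List.range grid.length).map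
          (fun i => dfsA grid grid.length (grid.getD 0 []).length ((grid.getD 0 []).length + 1) i 0))
          (fun x => x)).getD 0
      = (PySem.List.min? (List.foldl (stepB grid grid.length) (List.replicate grid.length 0)
          (List.range (grid.getD 0 []).length).reverse) (fun x => x)).getD 0
  rw [h]
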